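-- pv_equiv track=rewrite | github.com/pc5401/my_BOJ | 백준/Gold/1029. 그림 교환/그림 교환.py | solve
-- ===== SOURCE A (Python) =====
-- def solve(n: int, lst: list):
--     maxV = 1
--     dp = [[[0 for price in range(10)] # 가격 0~9
--             for visit in range(1 << n)] # 방문 경우
--                 for i in range(n)] # 예술가 수
--     dp[0][1][0] = 1
--
--     for visit in range(1 << n): # 모든 방문을 확인
--         for i in range(n): # 예술가 확인
--             for price in range(10): # 가격 확인
--                 if not dp[i][visit][price]: # 초기화된 값이 시작점 -> 이후 확장
--                     continue
--
--                 for j in range(n): # 다음 예술가 전부 확인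
--                     bit_value = (1 << j)
--                     next_price = lst[i][j]
--                     next_visit = visit | bit_value
--
--                     if price > next_price: # 1번 조건 : 가격 확인
--                         continue
--                     if visit & bit_value: # 2번 조건 :  중복 확인
--                         continue
--
--                     # dp 테이블 업그레이드
--                     v = dp[i][visit][price] + 1 # 방문 증가 저장
--                     dp[j][next_visit][next_price] = max(v, dp[j][next_visit][next_price])
--                     maxV = max(maxV, v)
--
--     return maxV
-- ===== SOURCE B (Python) =====
-- def solve(n: int, lst: list):
--     # Top-down memoized recursion over (artist, visited-mask, price), caching in the
--     # same n x 2^n x 10 table shape, instead of the bottom-up triple loop over every cell.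
--     memo = [[[0] * 10 for _ in range(1 << n)] for _ in range(n)]
--
--     def rec(i, visit, price):
--         if memo[i][visit][price]:
--             return memo[i][visit][price]
--         row = lst[i]
--         best = 1
--         for j in range(n):
--             np = row[j]
--             if visit >> j & 1:
--                 continue
--             if price <= np:
--                 cand = 1 + rec(j, visit | 1 << j, np)
--                 if cand > best:
--                     best = cand
--         memo[i][visit][price] = best
--         return best
--
--     return rec(0, 1, 0)
-- ===== Notes on version B (the rewrite author's own statement) =====
-- stated objective: alternative
-- what changed: Replaces A's bottom-up triple loop that scans every (artist, mask, price) cell of the n*2^n*10 dp table in mask order with a top-down memoized recursion over the same state space that only ever computes states actually reachable from the start state.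
import Mathlib
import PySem

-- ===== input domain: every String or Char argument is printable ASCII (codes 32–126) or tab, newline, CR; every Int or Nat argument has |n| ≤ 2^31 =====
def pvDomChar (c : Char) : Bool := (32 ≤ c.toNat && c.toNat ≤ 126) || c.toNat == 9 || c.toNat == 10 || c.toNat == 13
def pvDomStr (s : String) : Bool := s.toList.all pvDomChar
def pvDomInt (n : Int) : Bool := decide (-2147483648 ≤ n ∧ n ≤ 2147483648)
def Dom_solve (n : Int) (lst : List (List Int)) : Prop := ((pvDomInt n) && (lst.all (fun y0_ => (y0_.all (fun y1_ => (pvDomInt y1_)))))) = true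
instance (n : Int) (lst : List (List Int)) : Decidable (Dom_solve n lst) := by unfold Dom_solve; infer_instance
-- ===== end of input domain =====

-- B replaces A's bottom-up scan of every (artist, mask, price) cell by a top-down memoized
-- recursion over the same transition relation; equivalence is proved on Pre_solve, which
-- excludes exactly the inputs where A raises.

-- ===== PORT A =====
-- lst[i][j]; under Pre_solve every read A performs is in range, so the default is never read
def pvEntry (lst : List (List Int)) (i j : Nat) : Int := (lst.getD i []).getD j 0

-- dp is kept as a function table (Python's nested lists, index → value); pvUpd is one cell write
def pvUpd (dp : Nat → Nat → Nat → Int) (a b c : Nat) (x : Int) : Nat → Nat → Nat → Int :=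
  fun a' b' c' => if a' = a ∧ b' = b ∧ c' = c then x else dp a' b' c'

-- one iteration of A's innermost 'for j in range(n)' body, same reads/branches/writes
def pvStepA (lst : List (List Int)) (i visit price : Nat)
    (st : (Nat → Nat → Nat → Int) × Int) (j : Nat) : (Nat → Nat → Nat → Int) × Int :=
  let np := pvEntry lst i j
  let nv := visit ||| (1 <<< j)
  if (price : Int) > np then st
  else if visit.testBit j then st
  else
    let v := st.1 i visit price + 1
    (pvUpd st.1 j nv np.toNat (max v (st.1 j nv np.toNat)), max st.2 v)

-- A's body for one value of 'visit' (the two middle loops and the zero-skip guard)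
def pvVisitA (lst : List (List Int)) (n : Nat)
    (st0 : (Nat → Nat → Nat → Int) × Int) (visit : Nat) : (Nat → Nat → Nat → Int) × Int :=
  (List.range n).foldl (fun st i =>
    (List.range 10).foldl (fun st price =>
      if st.1 i visit price = 0 then st
      else (List.range n).foldl (pvStepA lst i visit price) st) st) st0

-- loop counters are Nat (exact for the n ≥ 1 of Pre_solve; Python's range values are ≥ 0)
def solve (n : Int) (lst : List (List Int)) : Int :=
  let N := n.toNat
  let dp0 : Nat → Nat → Nat → Int := fun i v p => if i = 0 ∧ v = 1 ∧ p = 0 then 1 else 0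
  ((List.range (2 ^ N)).foldl (pvVisitA lst N) (dp0, 1)).2

-- ===== PORT B =====
-- rec(i, visit, price) with the preallocated memo table (Python's nested lists, index → value,
-- 0 = not yet computed) threaded through; fuel only makes the recursion structural (n is
-- enough: each call sets one more of the n visit bits)
def pvRecB (lst : List (List Int)) (n : Nat) :
    Nat → Nat → Nat → Int → (Nat → Nat → Nat → Int) →
    Int × (Nat → Nat → Nat → Int)
  | 0, _, _, _, memo => (1, memo)
  | f+1, i, visit, price, memo =>
    if memo i visit price.toNat ≠ 0 then (memo i visit price.toNat, memo)
    else
      let row := lst.getD i []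
      let r := (List.range n).foldl (fun acc j =>
        let np := row.getD j 0
        if visit.testBit j then acc
        else
          if price ≤ np then
            let c := pvRecB lst n f j (visit ||| (1 <<< j)) np acc.2
            (if 1 + c.1 > acc.1 then 1 + c.1 else acc.1, c.2)
          else acc) ((1 : Int), memo)
      (r.1, pvUpd r.2 i visit price.toNat r.1)

def solve_alt (n : Int) (lst : List (List Int)) : Int :=
  (pvRecB lst n.toNat n.toNat 0 1 0 (fun _ _ _ => 0)).1

-- ===== PRECONDITION & SPEC =====
-- Pre_solve excludes exactly the inputs on which the Python A raises: n ≤ 0 (the empty dp table is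
-- indexed, or a negative shift), a row reachable by some valid exchange chain that is missing or
-- shorter than n (IndexError on lst[i][j]), or a reachable price entry ≥ 10, which A writes past
-- the dp price axis (IndexError).  It is stated as plain graph reachability over the ≤ 10·n
-- (artist, price) pairs — not a re-run of either port's mask DP / memoized recursion — and
-- excludes no input on which A returns.

-- all valid successor states of state q (artist `avoid` forbidden as target)
def pvSucc (lst : List (List Int)) (n avoid : Nat) (q : Nat × Nat) : List (Nat × Nat) :=
  ((List.range n).filter (fun k => decide (k ≠ avoid) &&
      decide (((q.2 : Nat) : Int) ≤ pvEntry lst q.1 k) && decide (pvEntry lst q.1 k ≤ 9))).map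
    (fun k => (k, (pvEntry lst q.1 k).toNat))

-- add a state unless already known
def pvAdd (S acc : List (Nat × Nat)) (s : Nat × Nat) : List (Nat × Nat) :=
  if s ∈ S ∨ s ∈ acc then acc else acc ++ [s]

-- one breadth-first round: expand the frontier SF.2, append the genuinely new states
def pvStepP (lst : List (List Int)) (n avoid : Nat)
    (SF : List (Nat × Nat) × List (Nat × Nat)) : List (Nat × Nat) × List (Nat × Nat) :=
  let new := (SF.2.flatMap (pvSucc lst n avoid)).foldl (pvAdd SF.1) []
  (SF.1 ++ new, new)

def pvIterP (lst : List (List Int)) (n avoid : Nat) : Nat → List (Nat × Nat) × List (Nat × Nat)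
  | 0 => (if avoid = 0 then [] else [(0, 0)], if avoid = 0 then [] else [(0, 0)])
  | m+1 => pvStepP lst n avoid (pvIterP lst n avoid m)

-- (artist, price) pairs reachable by a chain from artist 0 avoiding artist `avoid` (a chain has at
-- most n vertices, so n rounds saturate; avoid = n forbids nothing)
def pvClosure (lst : List (List Int)) (n avoid : Nat) : List (Nat × Nat) :=
  (pvIterP lst n avoid n).1

def pvCrash (lst : List (List Int)) (n : Nat) : Bool :=
  decide (lst.length = 0) || decide ((lst.getD 0 []).length < n) ||
    (pvClosure lst n n).any (fun s =>
      decide (lst.length ≤ s.1) || decide ((lst.getD s.1 []).length < n)) ||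
    (List.range n).any (fun j =>
      (pvClosure lst n n).any (fun s => decide (10 ≤ pvEntry lst s.1 j)) &&
        (pvClosure lst n j).any (fun s => decide (10 ≤ pvEntry lst s.1 j)))

def Pre_solve (n : Int) (lst : List (List Int)) : Prop :=
  1 ≤ n ∧ pvCrash lst n.toNat = false
instance (n : Int) (lst : List (List Int)) : Decidable (Pre_solve n lst) := by
  unfold Pre_solve; infer_instance

def pvWitness_solve : Int × List (List Int) := (2, [[0, 3], [0, 0]])

def Spec_solve (n : Int) (lst : List (List Int)) (out : Int) : Prop := out = solve_alt n lst
instance (n : Int) (lst : List (List Int)) (out : Int) : Decidable (Spec_solve n lst out) := by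
  unfold Spec_solve; infer_instance

-- ===== CLAIM (what is proved, stated in full; the proofs are below) =====
def Claim_equal_solve : Prop := ∀ (n : Int) (lst : List (List Int)),
  Dom_solve n lst → Pre_solve n lst → Spec_solve n lst (solve n lst)

-- ===== LEMMAS AND PROOFS =====

-- number of unset bits below n: the fuel measure / saturation threshold of the recursion
def pvUnset (n v : Nat) : Nat := ((List.range n).filter (fun j => !v.testBit j)).length

-- the pure (memo-free) value of B's recursion, by fuel
def pvBest (lst : List (List Int)) (n : Nat) : Nat → Nat → Nat → Int → Int
  | 0, _, _, _ => 1
  | f+1, i, v, p =>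
    (List.range n).foldl (fun acc j =>
      if v.testBit j = false ∧ p ≤ pvEntry lst i j
      then max acc (1 + pvBest lst n f j (v ||| (1 <<< j)) (pvEntry lst i j)) else acc) 1

-- saturated value: fuel = number of unset bits
def pvB (lst : List (List Int)) (n : Nat) (i v : Nat) (p : Int) : Int :=
  pvBest lst n (pvUnset n v) i v p

-- states reachable by a valid exchange chain of length k
inductive pvReach (lst : List (List Int)) (n : Nat) : Nat → Nat → Int → Nat → Prop
  | init : pvReach lst n 0 1 0 1
  | step {i v p k j} : pvReach lst n i v p k → j < n → v.testBit j = false →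
      p ≤ pvEntry lst i j → pvReach lst n j (v ||| (1 <<< j)) (pvEntry lst i j) (k+1)

-- ---- bit helpers ----
theorem pvTestBit_or_self (v j : Nat) : (v ||| (1 <<< j)).testBit j = true := by
  simp [Nat.testBit_or, Nat.one_shiftLeft, Nat.testBit_two_pow_self]

theorem pvTestBit_or_other (v j k : Nat) (h : k ≠ j) :
    (v ||| (1 <<< j)).testBit k = v.testBit k := by
  simp [Nat.testBit_or, Nat.one_shiftLeft, h.symm]

theorem pvLt_or (v j : Nat) (h : v.testBit j = false) : v < v ||| (1 <<< j) := by
  rcases Nat.lt_or_ge v (v ||| (1 <<< j)) with h' | h'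
  · exact h'
  · exfalso
    have heq : v = v ||| (1 <<< j) := le_antisymm Nat.left_le_or h'
    have htb := pvTestBit_or_self v j
    rw [← heq, h] at htb
    exact Bool.false_ne_true htb

theorem pvOr_lt_pow (v j n : Nat) (hv : v < 2 ^ n) (hj : j < n) : v ||| (1 <<< j) < 2 ^ n := by
  rw [Nat.one_shiftLeft]
  exact Nat.or_lt_two_pow hv (Nat.pow_lt_pow_right (by norm_num) hj)

theorem pvUnset_pos (n v j : Nat) (hj : j < n) (h : v.testBit j = false) : 1 ≤ pvUnset n v := by
  have hmem : j ∈ (List.range n).filter (fun k => !v.testBit k) :=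
    List.mem_filter.mpr ⟨List.mem_range.mpr hj, by simp [h]⟩
  exact List.length_pos_of_mem hmem

theorem pvUnset_or_lt (n v j : Nat) (hj : j < n) (h : v.testBit j = false) :
    pvUnset n (v ||| (1 <<< j)) < pvUnset n v := by
  unfold pvUnset
  have hsub : List.Sublist ((List.range n).filter (fun k => !(v ||| (1 <<< j)).testBit k))
      ((List.range n).filter (fun k => !v.testBit k)) := by
    apply List.monotone_filter_right
    intro k hk
    by_cases hkj : k = j
    · subst hkj
      rw [pvTestBit_or_self] at hk
      simp at hk
    · rw [pvTestBit_or_other v j k hkj] at hk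
      exact hk
  rcases Nat.lt_or_ge (((List.range n).filter (fun k => !(v ||| (1 <<< j)).testBit k)).length)
      (((List.range n).filter (fun k => !v.testBit k)).length) with hlt | hge
  · exact hlt
  · exfalso
    have hlen : ((List.range n).filter (fun k => !(v ||| (1 <<< j)).testBit k)).length =
        ((List.range n).filter (fun k => !v.testBit k)).length :=
      le_antisymm hsub.length_le hge
    have heq := (List.Sublist.length_eq hsub).mp hlen
    have hmem : j ∈ (List.range n).filter (fun k => !v.testBit k) :=
      List.mem_filter.mpr ⟨List.mem_range.mpr hj, by simp [h]⟩
    rw [← heq] at hmem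
    have := (List.mem_filter.mp hmem).2
    rw [pvTestBit_or_self] at this
    simp at this

theorem pvUnset_lt_of_testBit (n v j : Nat) (hj : j < n) (h : v.testBit j = true) :
    pvUnset n v < n := by
  unfold pvUnset
  have hsub : List.Sublist ((List.range n).filter (fun k => !v.testBit k)) (List.range n) :=
    List.filter_sublist
  rcases Nat.lt_or_ge (((List.range n).filter (fun k => !v.testBit k)).length)
      ((List.range n).length) with hlt | hge
  · simpa using hlt
  · exfalso
    have hlen : ((List.range n).filter (fun k => !v.testBit k)).length =
        (List.range n).length := le_antisymm hsub.length_le hge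
    have heq := (List.Sublist.length_eq hsub).mp hlen
    have hmem : j ∈ (List.range n).filter (fun k => !v.testBit k) := by
      rw [heq]; exact List.mem_range.mpr hj
    have := (List.mem_filter.mp hmem).2
    rw [h] at this
    simp at this

theorem pvUnset_zero_testBit (n v j : Nat) (hu : pvUnset n v = 0) (hj : j < n) :
    v.testBit j = true := by
  by_contra h
  have h' : v.testBit j = false := by
    cases hb : v.testBit j
    · rfl
    · exact absurd hb h
  have := pvUnset_pos n v j hj h'
  omega

-- ---- the closure really contains every chain-reachable (artist, price) pair ----
theorem pvFoldAdd_grow (S : List (Nat × Nat)) :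
    ∀ (l acc : List (Nat × Nat)) {t : Nat × Nat}, t ∈ acc → t ∈ l.foldl (pvAdd S) acc := by
  intro l
  induction l with
  | nil => intro acc t ht; exact ht
  | cons x l ih =>
    intro acc t ht
    refine ih _ ?_
    unfold pvAdd
    split
    · exact ht
    · exact List.mem_append_left _ ht

theorem pvFoldAdd_mem (S : List (Nat × Nat)) :
    ∀ (l acc : List (Nat × Nat)) {t : Nat × Nat}, t ∈ l →
      t ∈ S ∨ t ∈ l.foldl (pvAdd S) acc := by
  intro l
  induction l with
  | nil => intro acc t ht; exact absurd ht (List.not_mem_nil)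
  | cons x l ih =>
    intro acc t ht
    rcases List.mem_cons.mp ht with rfl | hl
    · by_cases hS : t ∈ S
      · exact Or.inl hS
      · right
        refine pvFoldAdd_grow S l _ ?_
        unfold pvAdd
        split
        · next hor =>
          rcases hor with h | h
          · exact absurd h hS
          · exact h
        · exact List.mem_append_right _ List.mem_cons_self
    · exact ih _ hl

theorem pvSucc_mem (lst : List (List Int)) (n avoid : Nat) (q : Nat × Nat) (t : Nat)
    (ht : t < n) (hav : t ≠ avoid) (hle : ((q.2 : Nat) : Int) ≤ pvEntry lst q.1 t)
    (h9 : pvEntry lst q.1 t ≤ 9) :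
    (t, (pvEntry lst q.1 t).toNat) ∈ pvSucc lst n avoid q := by
  unfold pvSucc
  refine List.mem_map.mpr ⟨t, List.mem_filter.mpr ⟨List.mem_range.mpr ht, ?_⟩, rfl⟩
  simp only [Bool.and_eq_true, decide_eq_true_eq]
  exact ⟨⟨hav, hle⟩, h9⟩

theorem pvIterP_lift (lst : List (List Int)) (n avoid : Nat) {s : Nat × Nat} {m m' : Nat}
    (h : m ≤ m') (hm : s ∈ (pvIterP lst n avoid m).1) : s ∈ (pvIterP lst n avoid m').1 := by
  induction m' with
  | zero => rw [Nat.le_zero.mp h] at hm; exact hm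
  | succ m'' ih =>
    rcases Nat.lt_or_ge m (m'' + 1) with hlt | hge
    · show s ∈ (pvIterP lst n avoid m'').1 ++ _
      exact List.mem_append_left _ (ih (by omega))
    · have hme : m = m'' + 1 := by omega
      rw [← hme]; exact hm

theorem pvIterP_step (lst : List (List Int)) (n avoid : Nat) {q : Nat × Nat} (t : Nat)
    (ht : t < n) (hav : t ≠ avoid) (hle : ((q.2 : Nat) : Int) ≤ pvEntry lst q.1 t)
    (h9 : pvEntry lst q.1 t ≤ 9) :
    ∀ m, q ∈ (pvIterP lst n avoid m).1 →
      (t, (pvEntry lst q.1 t).toNat) ∈ (pvIterP lst n avoid (m + 1)).1 := by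
  have hsucc := pvSucc_mem lst n avoid q t ht hav hle h9
  intro m
  induction m with
  | zero =>
    intro hq
    have hbatch : (t, (pvEntry lst q.1 t).toNat) ∈
        (pvIterP lst n avoid 0).2.flatMap (pvSucc lst n avoid) :=
      List.mem_flatMap.mpr ⟨q, hq, hsucc⟩
    rcases pvFoldAdd_mem (pvIterP lst n avoid 0).1 _ [] hbatch with h | h
    · exact List.mem_append_left _ h
    · exact List.mem_append_right _ h
  | succ m ih =>
    intro hq
    rcases List.mem_append.mp hq with hS | hF
    · exact pvIterP_lift lst n avoid (by omega) (ih hS)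
    · have hbatch : (t, (pvEntry lst q.1 t).toNat) ∈
          (pvIterP lst n avoid (m + 1)).2.flatMap (pvSucc lst n avoid) :=
        List.mem_flatMap.mpr ⟨q, hF, hsucc⟩
      rcases pvFoldAdd_mem (pvIterP lst n avoid (m + 1)).1 _ [] hbatch with h | h
      · exact List.mem_append_left _ h
      · exact List.mem_append_right _ h

theorem pvReach_mem (lst : List (List Int)) (n : Nat) (hn : 1 ≤ n)
    (hcr : pvCrash lst n = false) :
    ∀ i v p k, pvReach lst n i v p k →
      1 ≤ k ∧ k + pvUnset n v ≤ n ∧ 0 ≤ p ∧ p ≤ 9 ∧ i < n ∧ v.testBit i = true ∧ v < 2 ^ n ∧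
        (i, p.toNat) ∈ (pvIterP lst n n (k - 1)).1 ∧
        (∀ j, j < n → v.testBit j = false → (i, p.toNat) ∈ (pvIterP lst n j (k - 1)).1) := by
  intro i v p k h
  induction h with
  | init =>
    refine ⟨le_refl _, ?_, le_refl _, by norm_num, hn, by decide,
      Nat.one_lt_two_pow (by omega), ?_, ?_⟩
    · have := pvUnset_lt_of_testBit n 1 0 hn (by decide)
      omega
    · show (0, (0 : Int).toNat) ∈ (pvIterP lst n n 0).1
      show (0, (0 : Int).toNat) ∈ if n = 0 then [] else [(0, 0)]
      rw [if_neg (by omega)]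
      simp
    · intro j hj htb
      have hj0 : j ≠ 0 := by
        intro h0; rw [h0] at htb; exact absurd htb (by decide)
      show (0, (0 : Int).toNat) ∈ (pvIterP lst n j 0).1
      show (0, (0 : Int).toNat) ∈ if j = 0 then [] else [(0, 0)]
      rw [if_neg hj0]
      simp
  | @step i v p k t hr ht htb hp ih =>
    obtain ⟨hk1, hkun, hp0, hp9, hi, hvi, hvlt, hmemF, hmem⟩ := ih
    obtain ⟨k', rfl⟩ : ∃ k', k = k' + 1 := ⟨k - 1, by omega⟩
    have hmem_t : (i, p.toNat) ∈ pvClosure lst n t :=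
      pvIterP_lift lst n t (by omega) (hmem t ht htb)
    have hmem_f : (i, p.toNat) ∈ pvClosure lst n n :=
      pvIterP_lift lst n n (by omega) hmemF
    have hq2 : (((i, p.toNat).2 : Nat) : Int) = p := Int.toNat_of_nonneg hp0
    have he9 : pvEntry lst i t ≤ 9 := by
      by_contra hgt
      have h10 : (10 : Int) ≤ pvEntry lst i t := by omega
      have houter : (List.range n).any (fun j =>
          (pvClosure lst n n).any (fun s => decide (10 ≤ pvEntry lst s.1 j)) &&
            (pvClosure lst n j).any (fun s => decide (10 ≤ pvEntry lst s.1 j))) = true := by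
        refine List.any_eq_true.mpr ⟨t, List.mem_range.mpr ht, ?_⟩
        rw [Bool.and_eq_true]
        exact ⟨List.any_eq_true.mpr ⟨(i, p.toNat), hmem_f, decide_eq_true h10⟩,
          List.any_eq_true.mpr ⟨(i, p.toNat), hmem_t, decide_eq_true h10⟩⟩
      have hct : pvCrash lst n = true := by
        unfold pvCrash; rw [houter, Bool.or_true]
      rw [hcr] at hct; exact Bool.false_ne_true hct
    have he0 : (0 : Int) ≤ pvEntry lst i t := le_trans hp0 hp
    have hle : (((i, p.toNat).2 : Nat) : Int) ≤ pvEntry lst (i, p.toNat).1 t := by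
      rw [hq2]; exact hp
    have hun2 := pvUnset_or_lt n v t ht htb
    refine ⟨by omega, by omega, he0, he9, ht, pvTestBit_or_self v t,
      pvOr_lt_pow v t n hvlt ht, ?_, ?_⟩
    · show (t, (pvEntry lst i t).toNat) ∈ (pvIterP lst n n (k' + 1 + 1 - 1)).1
      exact pvIterP_step lst n n t ht (by omega) hle he9 k' hmemF
    · intro j hj hjtb
      have hjt : j ≠ t := by
        intro hh
        rw [hh, pvTestBit_or_self] at hjtb
        exact Bool.false_ne_true hjtb.symm
      have hjv : v.testBit j = false := by
        rw [pvTestBit_or_other v t j hjt] at hjtb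
        exact hjtb
      show (t, (pvEntry lst i t).toNat) ∈ (pvIterP lst n j (k' + 1 + 1 - 1)).1
      exact pvIterP_step lst n j t ht (Ne.symm hjt) hle he9 k' (hmem j hj hjv)

theorem pvReach_ent (lst : List (List Int)) (n : Nat) (hn : 1 ≤ n)
    (hcr : pvCrash lst n = false) :
    ∀ i v p k j, pvReach lst n i v p k → j < n → v.testBit j = false →
      p ≤ pvEntry lst i j → pvEntry lst i j < 10 := by
  intro i v p k j hr hj htb hp
  obtain ⟨hk1, hkun, hp0, -, -, -, -, hmemF, hmem⟩ := pvReach_mem lst n hn hcr i v p k hr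
  by_contra hgt
  have h10 : (10 : Int) ≤ pvEntry lst i j := by omega
  have hcl : (i, p.toNat) ∈ pvClosure lst n j :=
    pvIterP_lift lst n j (by omega) (hmem j hj htb)
  have hclf : (i, p.toNat) ∈ pvClosure lst n n :=
    pvIterP_lift lst n n (by omega) hmemF
  have houter : (List.range n).any (fun j' =>
      (pvClosure lst n n).any (fun s => decide (10 ≤ pvEntry lst s.1 j')) &&
        (pvClosure lst n j').any (fun s => decide (10 ≤ pvEntry lst s.1 j'))) = true := by
    refine List.any_eq_true.mpr ⟨j, List.mem_range.mpr hj, ?_⟩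
    rw [Bool.and_eq_true]
    exact ⟨List.any_eq_true.mpr ⟨(i, p.toNat), hclf, decide_eq_true h10⟩,
      List.any_eq_true.mpr ⟨(i, p.toNat), hcl, decide_eq_true h10⟩⟩
  have hct : pvCrash lst n = true := by
    unfold pvCrash; rw [houter, Bool.or_true]
  rw [hcr] at hct; exact Bool.false_ne_true hct

-- ---- generic fold-of-max helpers ----
theorem pvMaxFold_ge_init {α : Type} (l : List α) (c : α → Prop) [DecidablePred c]
    (g : α → Int) (a : Int) :
    a ≤ l.foldl (fun acc x => if c x then max acc (g x) else acc) a := by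
  induction l generalizing a with
  | nil => simp
  | cons x l ih =>
    simp only [List.foldl_cons]
    refine le_trans ?_ (ih _)
    split
    · exact le_max_left _ _
    · exact le_refl _

theorem pvMaxFold_ge_elem {α : Type} (l : List α) (c : α → Prop) [DecidablePred c]
    (g : α → Int) (a : Int) {x : α} (hx : x ∈ l) (hc : c x) :
    g x ≤ l.foldl (fun acc y => if c y then max acc (g y) else acc) a := by
  induction l generalizing a with
  | nil => simp at hx
  | cons y l ih =>
    simp only [List.foldl_cons]
    rcases List.mem_cons.mp hx with hxy | hxl
    · subst hxy
      refine le_trans ?_ (pvMaxFold_ge_init l c g _)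
      rw [if_pos hc]
      exact le_max_right _ _
    · exact ih _ hxl

theorem pvMaxFold_cases {α : Type} (l : List α) (c : α → Prop) [DecidablePred c]
    (g : α → Int) (a : Int) :
    l.foldl (fun acc x => if c x then max acc (g x) else acc) a = a ∨
      ∃ x ∈ l, c x ∧ l.foldl (fun acc y => if c y then max acc (g y) else acc) a = g x := by
  induction l generalizing a with
  | nil => left; rfl
  | cons x l ih =>
    simp only [List.foldl_cons]
    by_cases hc : c x
    · rw [if_pos hc]
      rcases ih (max a (g x)) with h0 | ⟨y, hy, hcy, hey⟩
      · rcases max_choice a (g x) with hm | hm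
        · left; rw [h0, hm]
        · right; exact ⟨x, List.mem_cons_self, hc, by rw [h0, hm]⟩
      · right; exact ⟨y, List.mem_cons_of_mem _ hy, hcy, hey⟩
    · rw [if_neg hc]
      rcases ih a with h0 | ⟨y, hy, hcy, hey⟩
      · left; exact h0
      · right; exact ⟨y, List.mem_cons_of_mem _ hy, hcy, hey⟩

-- ---- saturation and the one-step unfolding of pvB ----
theorem pvBest_unset_zero (lst : List (List Int)) (n : Nat) (v : Nat) (hu : pvUnset n v = 0) :
    ∀ f i p, pvBest lst n f i v p = 1 := by
  intro f i p
  cases f with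
  | zero => rfl
  | succ f =>
    show (List.range n).foldl _ 1 = 1
    rcases pvMaxFold_cases (List.range n)
        (fun j => v.testBit j = false ∧ p ≤ pvEntry lst i j)
        (fun j => 1 + pvBest lst n f j (v ||| (1 <<< j)) (pvEntry lst i j)) 1 with h | ⟨j, hj, hc, _⟩
    · exact h
    · exact absurd (pvUnset_zero_testBit n v j hu (List.mem_range.mp hj)) (by simp [hc.1])

theorem pvBest_sat (lst : List (List Int)) (n : Nat) :
    ∀ f g i v p, pvUnset n v ≤ f → pvUnset n v ≤ g →
      pvBest lst n f i v p = pvBest lst n g i v p := by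
  intro f
  induction f with
  | zero =>
    intro g i v p hf hg
    rw [pvBest_unset_zero lst n v (by omega), pvBest_unset_zero lst n v (by omega)]
  | succ f ih =>
    intro g i v p hf hg
    by_cases hu : pvUnset n v = 0
    · rw [pvBest_unset_zero lst n v hu, pvBest_unset_zero lst n v hu]
    · obtain ⟨g', rfl⟩ : ∃ g', g = g' + 1 := ⟨g - 1, by omega⟩
      show (List.range n).foldl _ 1 = (List.range n).foldl _ 1
      apply List.foldl_ext
      intro acc j hj
      by_cases hc : v.testBit j = false ∧ p ≤ pvEntry lst i j
      · rw [if_pos hc, if_pos hc]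
        have hlt := pvUnset_or_lt n v j (List.mem_range.mp hj) hc.1
        rw [ih g' j (v ||| (1 <<< j)) (pvEntry lst i j) (by omega) (by omega)]
      · rw [if_neg hc, if_neg hc]

theorem pvB_unfold (lst : List (List Int)) (n : Nat) (i v : Nat) (p : Int) :
    pvB lst n i v p =
      (List.range n).foldl (fun acc j =>
        if v.testBit j = false ∧ p ≤ pvEntry lst i j
        then max acc (1 + pvB lst n j (v ||| (1 <<< j)) (pvEntry lst i j)) else acc) 1 := by
  unfold pvB
  cases hu : pvUnset n v with
  | zero =>
    rcases pvMaxFold_cases (List.range n)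
        (fun j => v.testBit j = false ∧ p ≤ pvEntry lst i j)
        (fun j => 1 + pvBest lst n (pvUnset n (v ||| (1 <<< j))) j (v ||| (1 <<< j)) (pvEntry lst i j))
        1 with h | ⟨j, hj, hc, _⟩
    · rw [h]; rfl
    · exact absurd (pvUnset_zero_testBit n v j hu (List.mem_range.mp hj)) (by simp [hc.1])
  | succ u =>
    show pvBest lst n (u + 1) i v p = _
    simp only [pvBest]
    apply List.foldl_ext
    intro acc j hj
    by_cases hc : v.testBit j = false ∧ p ≤ pvEntry lst i j
    · rw [if_pos hc, if_pos hc]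
      have hlt := pvUnset_or_lt n v j (List.mem_range.mp hj) hc.1
      rw [pvBest_sat lst n u (pvUnset n (v ||| (1 <<< j))) j (v ||| (1 <<< j)) (pvEntry lst i j)
        (by omega) (le_refl _)]
    · rw [if_neg hc, if_neg hc]

theorem pvB_ge_one (lst : List (List Int)) (n : Nat) (i v : Nat) (p : Int) :
    1 ≤ pvB lst n i v p := by
  rw [pvB_unfold]
  exact pvMaxFold_ge_init _ _ _ _

theorem pvB_step_le (lst : List (List Int)) (n : Nat) (i v j : Nat) (p : Int)
    (hj : j < n) (hb : v.testBit j = false) (hp : p ≤ pvEntry lst i j) :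
    1 + pvB lst n j (v ||| (1 <<< j)) (pvEntry lst i j) ≤ pvB lst n i v p := by
  rw [pvB_unfold lst n i v p]
  exact pvMaxFold_ge_elem _ _ _ _ (List.mem_range.mpr hj) ⟨hb, hp⟩

-- a chain realising pvB: from any reachable state one can extend by pvB - 1 more exchanges
theorem pvB_ext (lst : List (List Int)) (n : Nat) :
    ∀ u i v p k, pvUnset n v ≤ u → pvReach lst n i v p k →
      ∃ i' v' p' k', pvReach lst n i' v' p' k' ∧ (k' : Int) = (k : Int) + pvB lst n i v p - 1 := by
  intro u
  induction u with
  | zero =>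
    intro i v p k hu hr
    have h1 : pvB lst n i v p = 1 := by
      unfold pvB
      rw [show pvUnset n v = 0 by omega]
      rfl
    exact ⟨i, v, p, k, hr, by rw [h1]; ring⟩
  | succ u ih =>
    intro i v p k hu hr
    have hcase := pvMaxFold_cases (List.range n)
      (fun j => v.testBit j = false ∧ p ≤ pvEntry lst i j)
      (fun j => 1 + pvB lst n j (v ||| (1 <<< j)) (pvEntry lst i j)) 1
    rw [← pvB_unfold] at hcase
    rcases hcase with h1 | ⟨j, hjmem, ⟨htb, hple⟩, heq⟩
    · exact ⟨i, v, p, k, hr, by rw [h1]; ring⟩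
    · have hj : j < n := List.mem_range.mp hjmem
      have hr' := pvReach.step hr hj htb hple
      have hu' : pvUnset n (v ||| (1 <<< j)) ≤ u := by
        have := pvUnset_or_lt n v j hj htb
        omega
      obtain ⟨i', v', p', k', hr'', hk'⟩ := ih j (v ||| (1 <<< j)) (pvEntry lst i j) (k + 1) hu' hr'
      refine ⟨i', v', p', k', hr'', ?_⟩
      rw [heq]
      push_cast at hk' ⊢
      linarith

-- ---- the state order and generic fold lemmas for A's loops ----
def pvLE (s t : (Nat → Nat → Nat → Int) × Int) : Prop :=
  (∀ a b c, s.1 a b c ≤ t.1 a b c) ∧ s.2 ≤ t.2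

theorem pvLE_refl (s : (Nat → Nat → Nat → Int) × Int) : pvLE s s := ⟨fun _ _ _ => le_refl _, le_refl _⟩

theorem pvLE_trans {s t u : (Nat → Nat → Nat → Int) × Int} (h1 : pvLE s t) (h2 : pvLE t u) :
    pvLE s u := ⟨fun a b c => le_trans (h1.1 a b c) (h2.1 a b c), le_trans h1.2 h2.2⟩

theorem pvFoldl_mono' {α : Type} (f : (Nat → Nat → Nat → Int) × Int → α → (Nat → Nat → Nat → Int) × Int)
    (h : ∀ s a, pvLE s (f s a)) (l : List α) :
    ∀ s t, pvLE s t → pvLE s (l.foldl f t) := by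
  induction l with
  | nil => intro s t hst; exact hst
  | cons x l ih =>
    intro s t hst
    exact ih s (f t x) (pvLE_trans hst (h t x))

theorem pvFoldl_mono {α : Type} (f : (Nat → Nat → Nat → Int) × Int → α → (Nat → Nat → Nat → Int) × Int)
    (h : ∀ s a, pvLE s (f s a)) (l : List α) (s : (Nat → Nat → Nat → Int) × Int) :
    pvLE s (l.foldl f s) :=
  pvFoldl_mono' f h l s s (pvLE_refl s)

theorem pvFoldl_pres {α β : Type} (Q : β → Prop) (f : β → α → β) (l : List α)
    (h : ∀ s a, a ∈ l → Q s → Q (f s a)) (s : β) (hs : Q s) : Q (l.foldl f s) := by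
  induction l generalizing s with
  | nil => exact hs
  | cons x l ih =>
    exact ih (fun s a ha hq => h s a (List.mem_cons_of_mem _ ha) hq) _
      (h s x List.mem_cons_self hs)

theorem pvFoldl_reach {α : Type} (f : (Nat → Nat → Nat → Int) × Int → α → (Nat → Nat → Nat → Int) × Int)
    (hm : ∀ s a, pvLE s (f s a)) {l : List α} {x : α} (hx : x ∈ l)
    (R : (Nat → Nat → Nat → Int) × Int → Prop)
    (hR : ∀ s t, R s → pvLE s t → R t) {s0 : (Nat → Nat → Nat → Int) × Int}
    (hf : ∀ s, pvLE s0 s → R (f s x)) : R (l.foldl f s0) := by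
  induction l generalizing s0 with
  | nil => simp at hx
  | cons y l ih =>
    simp only [List.foldl_cons]
    rcases List.mem_cons.mp hx with hxy | hxl
    · subst hxy
      have hRy : R (f s0 x) := hf s0 (pvLE_refl s0)
      have := pvFoldl_mono' f hm l (f s0 x) (f s0 x) (pvLE_refl _)
      exact hR _ _ hRy this
    · exact ih hxl (s0 := f s0 y) (fun s hs => hf s (pvLE_trans (hm s0 y) hs))

theorem pvStepA_mono (lst : List (List Int)) (i visit price : Nat) :
    ∀ s j, pvLE s (pvStepA lst i visit price s j) := by
  intro s j
  simp only [pvStepA]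
  split
  · exact pvLE_refl s
  · split
    · exact pvLE_refl s
    · refine ⟨?_, le_max_left _ _⟩
      intro a b c
      show s.1 a b c ≤ if a = j ∧ b = visit ||| 1 <<< j ∧ c = (pvEntry lst i j).toNat then _ else s.1 a b c
      split
      · next hh =>
        obtain ⟨h1, h2, h3⟩ := hh
        subst h1; subst h2; subst h3
        exact le_max_right _ _
      · exact le_refl _

theorem pvVisitA_mono (lst : List (List Int)) (n : Nat) (s : (Nat → Nat → Nat → Int) × Int)
    (visit : Nat) : pvLE s (pvVisitA lst n s visit) := by
  unfold pvVisitA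
  apply pvFoldl_mono
  intro s i
  apply pvFoldl_mono
  intro s p
  split
  · exact pvLE_refl _
  · exact pvFoldl_mono _ (pvStepA_mono lst i visit p) _ _

-- ---- the loop invariant ----
def pvInv (lst : List (List Int)) (n : Nat) (V : Nat)
    (st : (Nat → Nat → Nat → Int) × Int) : Prop :=
  (1 ≤ st.1 0 1 0) ∧ (1 ≤ st.2) ∧
  (∀ a b c, 0 ≤ st.1 a b c) ∧
  (∀ a b c, 0 < st.1 a b c → ∃ k, pvReach lst n a b (c : Int) k) ∧
  (∀ a b c, a < n → c < 10 → 0 < st.1 a b c →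
      st.1 a b c + pvB lst n a b (c : Int) ≤ pvB lst n 0 1 0 + 1) ∧
  (st.2 ≤ pvB lst n 0 1 0) ∧
  (∀ i v p k j, pvReach lst n i v p k → j < n → v.testBit j = false →
      p ≤ pvEntry lst i j → v < V →
      (k + 1 : Int) ≤ st.1 j (v ||| (1 <<< j)) (pvEntry lst i j).toNat ∧ (k + 1 : Int) ≤ st.2)

theorem pvInv_step (lst : List (List Int)) (n : Nat)
    (hE : ∀ i v p k j, pvReach lst n i v p k → j < n → v.testBit j = false →
      p ≤ pvEntry lst i j → pvEntry lst i j < 10)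
    (hG : ∀ i v p k, pvReach lst n i v p k →
      i < n ∧ v.testBit i = true ∧ v < 2 ^ n ∧ 0 ≤ p ∧ p < 10 ∧ 1 ≤ k)
    (V : Nat) (st : (Nat → Nat → Nat → Int) × Int) (h : pvInv lst n V st) :
    pvInv lst n (V + 1) (pvVisitA lst n st V) := by
  obtain ⟨h1, h2, h0, hRc, hS, hM, hC⟩ := h
  have hmono := pvVisitA_mono lst n st V
  -- the pointwise part of the invariant survives every single update of the scan
  have hQ : (∀ a b c, 0 ≤ (pvVisitA lst n st V).1 a b c) ∧
      (∀ a b c, 0 < (pvVisitA lst n st V).1 a b c → ∃ k, pvReach lst n a b (c : Int) k) ∧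
      (∀ a b c, a < n → c < 10 → 0 < (pvVisitA lst n st V).1 a b c →
        (pvVisitA lst n st V).1 a b c + pvB lst n a b (c : Int) ≤ pvB lst n 0 1 0 + 1) ∧
      (pvVisitA lst n st V).2 ≤ pvB lst n 0 1 0 := by
    unfold pvVisitA
    refine pvFoldl_pres (fun s : (Nat → Nat → Nat → Int) × Int =>
      (∀ a b c, 0 ≤ s.1 a b c) ∧
      (∀ a b c, 0 < s.1 a b c → ∃ k, pvReach lst n a b (c : Int) k) ∧
      (∀ a b c, a < n → c < 10 → 0 < s.1 a b c →
        s.1 a b c + pvB lst n a b (c : Int) ≤ pvB lst n 0 1 0 + 1) ∧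
      s.2 ≤ pvB lst n 0 1 0) _ _ ?_ st ⟨h0, hRc, hS, hM⟩
    intro s i hi hq
    refine pvFoldl_pres (fun s : (Nat → Nat → Nat → Int) × Int =>
      (∀ a b c, 0 ≤ s.1 a b c) ∧
      (∀ a b c, 0 < s.1 a b c → ∃ k, pvReach lst n a b (c : Int) k) ∧
      (∀ a b c, a < n → c < 10 → 0 < s.1 a b c →
        s.1 a b c + pvB lst n a b (c : Int) ≤ pvB lst n 0 1 0 + 1) ∧
      s.2 ≤ pvB lst n 0 1 0) _ _ ?_ s hq
    intro s2 pp hpp hq2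
    split
    · exact hq2
    · next hnz =>
      have hpos : 0 < s2.1 i V pp := lt_of_le_of_ne (hq2.1 i V pp) (Ne.symm hnz)
      have key := pvFoldl_pres (fun s3 : (Nat → Nat → Nat → Int) × Int =>
        ((∀ a b c, 0 ≤ s3.1 a b c) ∧
        (∀ a b c, 0 < s3.1 a b c → ∃ k, pvReach lst n a b (c : Int) k) ∧
        (∀ a b c, a < n → c < 10 → 0 < s3.1 a b c →
          s3.1 a b c + pvB lst n a b (c : Int) ≤ pvB lst n 0 1 0 + 1) ∧
        s3.2 ≤ pvB lst n 0 1 0) ∧ 0 < s3.1 i V pp)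
        (pvStepA lst i V pp) (List.range n) ?_ s2 ⟨hq2, hpos⟩
      · exact key.1
      · intro s3 j hjmem hh
        obtain ⟨⟨hq30, hq3R, hq3S, hq3M⟩, hpos3⟩ := hh
        have hiN : i < n := List.mem_range.mp hi
        have hpp10 : pp < 10 := List.mem_range.mp hpp
        have hjN : j < n := List.mem_range.mp hjmem
        simp only [pvStepA]
        split
        · exact ⟨⟨hq30, hq3R, hq3S, hq3M⟩, hpos3⟩
        · next hnple =>
          split
          · exact ⟨⟨hq30, hq3R, hq3S, hq3M⟩, hpos3⟩
          · next hnbit =>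
            have hpe : ((pp : Nat) : Int) ≤ pvEntry lst i j := not_lt.mp hnple
            have he0 : (0 : Int) ≤ pvEntry lst i j :=
              le_trans (Int.natCast_nonneg pp) hpe
            have hbit : V.testBit j = false := by
              cases hb : V.testBit j
              · rfl
              · exact absurd hb hnbit
            obtain ⟨k0, hr0⟩ := hq3R i V pp hpos3
            have he10 : pvEntry lst i j < 10 := hE i V ((pp : Nat) : Int) k0 j hr0 hjN hbit hpe
            have hetEq : (((pvEntry lst i j).toNat : Nat) : Int) = pvEntry lst i j :=
              Int.toNat_of_nonneg he0
            have het10 : (pvEntry lst i j).toNat < 10 := by omega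
            have hSrc : s3.1 i V pp + pvB lst n i V (pp : Int) ≤ pvB lst n 0 1 0 + 1 :=
              hq3S i V pp hiN hpp10 hpos3
            have hstep : 1 + pvB lst n j (V ||| (1 <<< j)) (pvEntry lst i j) ≤
                pvB lst n i V (pp : Int) := pvB_step_le lst n i V j (pp : Int) hjN hbit hpe
            have hvb : s3.1 i V pp + 1 + pvB lst n j (V ||| (1 <<< j)) (pvEntry lst i j) ≤
                pvB lst n 0 1 0 + 1 := by linarith
            push_cast at hvb
            dsimp only
            refine ⟨⟨?_, ?_, ?_, ?_⟩, ?_⟩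
            · intro a b c
              show (0 : Int) ≤ pvUpd s3.1 j (V ||| (1 <<< j)) (pvEntry lst i j).toNat _ a b c
              unfold pvUpd
              split
              · refine le_trans ?_ (le_max_left _ _)
                have := hq30 i V pp
                omega
              · exact hq30 a b c
            · intro a b c hpos4
              by_cases htr : a = j ∧ b = V ||| (1 <<< j) ∧ c = (pvEntry lst i j).toNat
              · obtain ⟨rfl, rfl, rfl⟩ := htr
                refine ⟨k0 + 1, ?_⟩
                have hstep' := pvReach.step hr0 hjN hbit hpe
                rw [hetEq]
                exact hstep'
              · have heq : pvUpd s3.1 j (V ||| (1 <<< j)) (pvEntry lst i j).toNat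
                    (max (s3.1 i V pp + 1) (s3.1 j (V ||| (1 <<< j)) (pvEntry lst i j).toNat)) a b c
                    = s3.1 a b c := by unfold pvUpd; rw [if_neg htr]
                rw [heq] at hpos4
                exact hq3R a b c hpos4
            · intro a b c haN hc10 hpos4
              by_cases htr : a = j ∧ b = V ||| (1 <<< j) ∧ c = (pvEntry lst i j).toNat
              · obtain ⟨ha, hb, hc⟩ := htr
                rw [ha, hb, hc] at hpos4 ⊢
                have heq : pvUpd s3.1 j (V ||| (1 <<< j)) (pvEntry lst i j).toNat
                    (max (s3.1 i V pp + 1) (s3.1 j (V ||| (1 <<< j)) (pvEntry lst i j).toNat))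
                    j (V ||| (1 <<< j)) (pvEntry lst i j).toNat
                    = max (s3.1 i V pp + 1) (s3.1 j (V ||| (1 <<< j)) (pvEntry lst i j).toNat) := by
                  unfold pvUpd; rw [if_pos ⟨rfl, rfl, rfl⟩]
                rw [heq] at hpos4 ⊢
                rw [hetEq]
                rcases max_choice (s3.1 i V pp + 1)
                    (s3.1 j (V ||| (1 <<< j)) (pvEntry lst i j).toNat) with hm | hm
                · rw [hm]; linarith
                · rw [hm]
                  rw [hm] at hpos4
                  have := hq3S j (V ||| (1 <<< j)) (pvEntry lst i j).toNat hjN het10 hpos4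
                  rw [hetEq] at this
                  exact this
              · have heq : pvUpd s3.1 j (V ||| (1 <<< j)) (pvEntry lst i j).toNat
                    (max (s3.1 i V pp + 1) (s3.1 j (V ||| (1 <<< j)) (pvEntry lst i j).toNat)) a b c
                    = s3.1 a b c := by unfold pvUpd; rw [if_neg htr]
                rw [heq] at hpos4 ⊢
                exact hq3S a b c haN hc10 hpos4
            · have hvP : s3.1 i V pp + 1 ≤ pvB lst n 0 1 0 := by
                have := pvB_ge_one lst n j (V ||| (1 <<< j)) (pvEntry lst i j)
                linarith
              exact max_le hq3M hvP
            · have hVne : ¬(i = j ∧ V = V ||| (1 <<< j) ∧ pp = (pvEntry lst i j).toNat) := by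
                rintro ⟨-, hVv, -⟩
                have := pvLt_or V j hbit
                omega
              show 0 < pvUpd s3.1 j (V ||| (1 <<< j)) (pvEntry lst i j).toNat _ i V pp
              unfold pvUpd
              rw [if_neg hVne]
              exact hpos3
  -- completeness: newly processed mask V
  refine ⟨le_trans h1 (hmono.1 0 1 0), le_trans h2 hmono.2, hQ.1, hQ.2.1, hQ.2.2.1,
    hQ.2.2.2, ?_⟩
  intro i v p k j hr hjN hvb hple hvV1
  by_cases hv : v < V
  · obtain ⟨hd, hm⟩ := hC i v p k j hr hjN hvb hple hv
    exact ⟨le_trans hd (hmono.1 _ _ _), le_trans hm hmono.2⟩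
  · have hvV : v = V := by omega
    subst hvV
    obtain ⟨hiN, hvbi, hvlt, hp0, hp10, hk1⟩ := hG i v p k hr
    have hppEq : ((p.toNat : Nat) : Int) = p := Int.toNat_of_nonneg hp0
    have hread : (k : Int) ≤ st.1 i v p.toNat := by
      cases hr with
      | init => simpa using h1
      | step hr0 hj0 htb0 hp0' =>
        rename_i i0 v0 p0 k0
        have hv0 : v0 < v0 ||| (1 <<< i) := pvLt_or v0 i htb0
        have := (hC i0 v0 p0 k0 i hr0 hj0 htb0 hp0' hv0).1
        push_cast
        push_cast at this
        exact this
    -- run the scan down to the (i, p) cell and then the j update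
    have hR := pvFoldl_reach (l := List.range n) (x := i)
      (f := fun st' i' => (List.range 10).foldl (fun st'' price =>
        if st''.1 i' v price = 0 then st''
        else (List.range n).foldl (pvStepA lst i' v price) st'') st')
      ?_ (List.mem_range.mpr hiN)
      (fun s' => (k + 1 : Int) ≤ s'.1 j (v ||| (1 <<< j)) (pvEntry lst i j).toNat ∧
        (k + 1 : Int) ≤ s'.2)
      ?_ (s0 := st) ?_
    · exact hR
    · intro s' a
      apply pvFoldl_mono
      intro s'' pr
      split
      · exact pvLE_refl _
      · exact pvFoldl_mono _ (pvStepA_mono lst a v pr) _ _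
    · intro s' t' hs' hst'
      exact ⟨le_trans hs'.1 (hst'.1 _ _ _), le_trans hs'.2 hst'.2⟩
    · intro s' hs'
      dsimp only
      refine pvFoldl_reach (l := List.range 10) (x := p.toNat)
        (f := fun st'' price => if st''.1 i v price = 0 then st''
          else (List.range n).foldl (pvStepA lst i v price) st'')
        ?_ (List.mem_range.mpr (by omega))
        (fun s'' => (k + 1 : Int) ≤ s''.1 j (v ||| (1 <<< j)) (pvEntry lst i j).toNat ∧
          (k + 1 : Int) ≤ s''.2)
        ?_ (s0 := s') ?_
      · intro s'' pr
        dsimp only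
        split
        · exact pvLE_refl _
        · exact pvFoldl_mono _ (pvStepA_mono lst i v pr) _ _
      · intro s'' t'' hs'' hst''
        exact ⟨le_trans hs''.1 (hst''.1 _ _ _), le_trans hs''.2 hst''.2⟩
      · intro s'' hs''
        dsimp only
        have hread'' : (k : Int) ≤ s''.1 i v p.toNat :=
          le_trans hread (le_trans (hs'.1 _ _ _) (hs''.1 _ _ _))
        have hnz : ¬ s''.1 i v p.toNat = 0 := by
          intro hz; rw [hz] at hread''
          have : (1 : Int) ≤ (k : Int) := by exact_mod_cast hk1
          omega
        rw [if_neg hnz]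
        refine pvFoldl_reach (l := List.range n) (x := j)
          (f := pvStepA lst i v p.toNat) (pvStepA_mono lst i v p.toNat)
          (List.mem_range.mpr hjN)
          (fun s4 => (k + 1 : Int) ≤ s4.1 j (v ||| (1 <<< j)) (pvEntry lst i j).toNat ∧
            (k + 1 : Int) ≤ s4.2)
          ?_ (s0 := s'') ?_
        · intro s4 t4 hs4 hst4
          exact ⟨le_trans hs4.1 (hst4.1 _ _ _), le_trans hs4.2 hst4.2⟩
        · intro s4 hs4
          have hread4 : (k : Int) ≤ s4.1 i v p.toNat :=
            le_trans hread'' (hs4.1 _ _ _)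
          simp only [pvStepA]
          rw [if_neg (by rw [hppEq]; exact not_lt.mpr hple), if_neg (by simp [hvb])]
          constructor
          · show (k + 1 : Int) ≤ pvUpd s4.1 j (v ||| (1 <<< j)) (pvEntry lst i j).toNat
              (max (s4.1 i v p.toNat + 1) _) j (v ||| (1 <<< j)) (pvEntry lst i j).toNat
            unfold pvUpd
            rw [if_pos ⟨rfl, rfl, rfl⟩]
            refine le_trans ?_ (le_max_left _ _)
            omega
          · show (k + 1 : Int) ≤ max s4.2 (s4.1 i v p.toNat + 1)
            refine le_trans ?_ (le_max_right _ _)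
            omega

theorem pvInv_final (lst : List (List Int)) (n : Nat)
    (hE : ∀ i v p k j, pvReach lst n i v p k → j < n → v.testBit j = false →
      p ≤ pvEntry lst i j → pvEntry lst i j < 10)
    (hG : ∀ i v p k, pvReach lst n i v p k →
      i < n ∧ v.testBit i = true ∧ v < 2 ^ n ∧ 0 ≤ p ∧ p < 10 ∧ 1 ≤ k) :
    ∀ m, pvInv lst n m ((List.range m).foldl (pvVisitA lst n)
      ((fun i v p => if i = 0 ∧ v = 1 ∧ p = 0 then 1 else 0), 1)) := by
  intro m
  induction m with
  | zero =>
    rw [List.range_zero, List.foldl_nil]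
    refine ⟨by norm_num, le_refl 1, ?_, ?_, ?_, ?_, ?_⟩
    · intro a b c
      dsimp only
      split <;> norm_num
    · intro a b c hpos
      dsimp only at hpos
      split at hpos
      · next hh =>
        obtain ⟨rfl, rfl, rfl⟩ := hh
        exact ⟨1, pvReach.init⟩
      · exact absurd hpos (by norm_num)
    · intro a b c _ _ hpos
      dsimp only at hpos ⊢
      split at hpos
      · next hh =>
        obtain ⟨rfl, rfl, rfl⟩ := hh
        rw [if_pos ⟨rfl, rfl, rfl⟩]
        have := pvB_ge_one lst n 0 1 0
        push_cast
        linarith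
      · exact absurd hpos (by norm_num)
    · exact pvB_ge_one lst n 0 1 0
    · intro i v p k j _ _ _ _ hv
      exact absurd hv (by omega)
  | succ m ih =>
    rw [List.range_succ, List.foldl_append, List.foldl_cons, List.foldl_nil]
    exact pvInv_step lst n hE hG m _ ih

theorem pvA_eq (lst : List (List Int)) (n : Nat)
    (hE : ∀ i v p k j, pvReach lst n i v p k → j < n → v.testBit j = false →
      p ≤ pvEntry lst i j → pvEntry lst i j < 10)
    (hG : ∀ i v p k, pvReach lst n i v p k →
      i < n ∧ v.testBit i = true ∧ v < 2 ^ n ∧ 0 ≤ p ∧ p < 10 ∧ 1 ≤ k) :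
    ((List.range (2 ^ n)).foldl (pvVisitA lst n)
      ((fun i v p => if i = 0 ∧ v = 1 ∧ p = 0 then 1 else 0), 1)).2 = pvB lst n 0 1 0 := by
  obtain ⟨i1, i2, i0, iR, iS, iM, iC⟩ := pvInv_final lst n hE hG (2 ^ n)
  refine le_antisymm iM ?_
  obtain ⟨i', v', p', k', hr', hk'⟩ :=
    pvB_ext lst n (pvUnset n 1) 0 1 0 1 (le_refl _) pvReach.init
  have hk'' : (k' : Int) = pvB lst n 0 1 0 := by push_cast at hk' ⊢; linarith
  cases hr' with
  | init =>
    rw [← hk'']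
    exact_mod_cast i2
  | step hr0 hj0 htb0 hp0 =>
    rename_i i0' v0 p0 k0
    have hlt : v0 < 2 ^ n := (hG i0' v0 p0 k0 hr0).2.2.1
    have := (iC i0' v0 p0 k0 _ hr0 hj0 htb0 hp0 hlt).2
    rw [← hk'']
    push_cast
    push_cast at this
    exact this

-- ---- B's memoised recursion computes pvB ----
theorem pvEntry_def (lst : List (List Int)) (i j : Nat) :
    pvEntry lst i j = (lst.getD i []).getD j 0 := rfl

theorem pvUpd_self (dp : Nat → Nat → Nat → Int) (a b c : Nat) (x : Int) :
    pvUpd dp a b c x a b c = x := by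
  unfold pvUpd
  rw [if_pos ⟨rfl, rfl, rfl⟩]

theorem pvUpd_other {dp : Nat → Nat → Nat → Int} {a b c : Nat} {x : Int} {a' b' c' : Nat}
    (h : ¬(a' = a ∧ b' = b ∧ c' = c)) : pvUpd dp a b c x a' b' c' = dp a' b' c' := by
  unfold pvUpd
  rw [if_neg h]

def pvMInv (lst : List (List Int)) (n : Nat) (m : Nat → Nat → Nat → Int) : Prop :=
  ∀ i v c, m i v c ≠ 0 → m i v c = pvB lst n i v (c : Int)

theorem pvRecB_correct (lst : List (List Int)) (n : Nat) :
    ∀ f i v p m, pvUnset n v ≤ f → 0 ≤ p → pvMInv lst n m →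
      (pvRecB lst n f i v p m).1 = pvB lst n i v p ∧ pvMInv lst n (pvRecB lst n f i v p m).2 := by
  intro f
  induction f with
  | zero =>
    intro i v p m hu hp0 hm
    have hB : pvB lst n i v p = 1 := by
      unfold pvB
      rw [show pvUnset n v = 0 by omega]
      rfl
    exact ⟨hB.symm, hm⟩
  | succ f ih =>
    intro i v p m hu hp0 hm
    have hpt : ((p.toNat : Nat) : Int) = p := Int.toNat_of_nonneg hp0
    simp only [pvRecB]
    simp only [← pvEntry_def]
    by_cases hz : m i v p.toNat ≠ 0
    · rw [if_pos hz]
      have hv := hm i v p.toNat hz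
      rw [hpt] at hv
      exact ⟨hv, hm⟩
    · rw [if_neg hz]
      have key : ∀ l : List Nat, (∀ j ∈ l, j < n) →
          ∀ (a : Int) (m0 : Nat → Nat → Nat → Int), pvMInv lst n m0 →
          (l.foldl (fun acc j =>
            if v.testBit j then acc
            else
              if p ≤ pvEntry lst i j then
                (if (1 : Int) + (pvRecB lst n f j (v ||| (1 <<< j)) (pvEntry lst i j) acc.2).1 > acc.1
                  then (1 : Int) + (pvRecB lst n f j (v ||| (1 <<< j)) (pvEntry lst i j) acc.2).1 else acc.1,
                  (pvRecB lst n f j (v ||| (1 <<< j)) (pvEntry lst i j) acc.2).2)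
              else acc) (a, m0)).1
            = l.foldl (fun acc j =>
                if v.testBit j = false ∧ p ≤ pvEntry lst i j
                then max acc (1 + pvB lst n j (v ||| (1 <<< j)) (pvEntry lst i j)) else acc) a ∧
          pvMInv lst n (l.foldl (fun acc j =>
            if v.testBit j then acc
            else
              if p ≤ pvEntry lst i j then
                (if (1 : Int) + (pvRecB lst n f j (v ||| (1 <<< j)) (pvEntry lst i j) acc.2).1 > acc.1
                  then (1 : Int) + (pvRecB lst n f j (v ||| (1 <<< j)) (pvEntry lst i j) acc.2).1 else acc.1,
                  (pvRecB lst n f j (v ||| (1 <<< j)) (pvEntry lst i j) acc.2).2)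
              else acc) (a, m0)).2 := by
        intro l
        induction l with
        | nil => exact fun _ a m0 hm0 => ⟨rfl, hm0⟩
        | cons j l ihl =>
          intro hl a m0 hm0
          have hjn : j < n := hl j List.mem_cons_self
          have hl' : ∀ x ∈ l, x < n := fun x hx => hl x (List.mem_cons_of_mem _ hx)
          simp only [List.foldl_cons]
          by_cases htbj : v.testBit j
          · rw [if_pos htbj, if_neg (by simp [htbj])]
            exact ihl hl' a m0 hm0
          · have htbj' : v.testBit j = false := by
              cases hb : v.testBit j
              · rfl
              · exact absurd hb htbj
            rw [if_neg htbj]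
            by_cases hple : p ≤ pvEntry lst i j
            · have hu' : pvUnset n (v ||| (1 <<< j)) ≤ f := by
                have := pvUnset_or_lt n v j hjn htbj'
                omega
              have he0 : (0 : Int) ≤ pvEntry lst i j := le_trans hp0 hple
              obtain ⟨hc1, hc2⟩ := ih j (v ||| (1 <<< j)) (pvEntry lst i j) m0 hu' he0 hm0
              have hcond : v.testBit j = false ∧ p ≤ pvEntry lst i j := ⟨htbj', hple⟩
              rw [if_pos hcond]
              show (List.foldl _ (if p ≤ pvEntry lst i j then _ else (a, m0)) l).1 = _ ∧ _
              rw [if_pos hple]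
              have hmax : (if (1 : Int) + (pvRecB lst n f j (v ||| (1 <<< j)) (pvEntry lst i j) m0).1 > a
                    then (1 : Int) + (pvRecB lst n f j (v ||| (1 <<< j)) (pvEntry lst i j) m0).1 else a)
                  = max a ((1 : Int) + pvB lst n j (v ||| (1 <<< j)) (pvEntry lst i j)) := by
                rw [hc1]
                by_cases hca : (1 : Int) + pvB lst n j (v ||| (1 <<< j)) (pvEntry lst i j) > a
                · rw [if_pos hca, max_eq_right (le_of_lt hca)]
                · rw [if_neg hca, max_eq_left (by omega)]
              rw [hmax]
              exact ihl hl' _ _ hc2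
            · have hcond' : ¬(v.testBit j = false ∧ p ≤ pvEntry lst i j) := fun hh => hple hh.2
              rw [if_neg hcond']
              show (List.foldl _ (if p ≤ pvEntry lst i j then _ else (a, m0)) l).1 = _ ∧ _
              rw [if_neg hple]
              exact ihl hl' a m0 hm0
      obtain ⟨hfold1, hfoldinv⟩ := key (List.range n) (fun j hj => List.mem_range.mp hj) 1 m hm
      constructor
      · dsimp only
        rw [hfold1, ← pvB_unfold]
      · dsimp only
        intro i' v' c' hne
        by_cases htr : i' = i ∧ v' = v ∧ c' = p.toNat
        · obtain ⟨rfl, rfl, rfl⟩ := htr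
          rw [pvUpd_self, hpt, hfold1, ← pvB_unfold]
        · rw [pvUpd_other htr] at hne ⊢
          exact hfoldinv i' v' c' hne

theorem pvB_alt (lst : List (List Int)) (n : Nat) :
    (pvRecB lst n n 0 1 0 (fun _ _ _ => 0)).1 = pvB lst n 0 1 0 := by
  have hm : pvMInv lst n (fun _ _ _ => 0) := fun i v c h => absurd rfl h
  have hu : pvUnset n 1 ≤ n :=
    le_trans (List.length_filter_le _ _) (by simp)
  exact (pvRecB_correct lst n n 0 1 0 (fun _ _ _ => 0) hu (le_refl 0) hm).1

-- ===== VERDICT (by name: the statement is the Claim_ definition above) =====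
theorem solve_spec : Claim_equal_solve := by
  intro n lst _ hPre
  obtain ⟨hn, hcr⟩ := hPre
  have hn' : 1 ≤ n.toNat := by omega
  have hE := pvReach_ent lst n.toNat hn' hcr
  have hG : ∀ i v p k, pvReach lst n.toNat i v p k →
      i < n.toNat ∧ v.testBit i = true ∧ v < 2 ^ n.toNat ∧ 0 ≤ p ∧ p < 10 ∧ 1 ≤ k := by
    intro i v p k hr
    obtain ⟨hk, -, hp0, hp9, hi, htb, hvlt, -, -⟩ := pvReach_mem lst n.toNat hn' hcr i v p k hr
    exact ⟨hi, htb, hvlt, hp0, by omega, hk⟩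
  show solve n lst = solve_alt n lst
  unfold solve solve_alt
  rw [pvA_eq lst n.toNat hE hG, pvB_alt lst n.toNat]
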